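-- pv_equiv track=rewrite | github.com/novoseiversia/eee111 | 6/ndigit_binary.py | ndigit_binary_even0_odd1
-- ===== SOURCE A (Python) =====
-- def ndigit_binary_z(n: int, z: int) -> list[str]:
-- 	if n == 1:
-- 		if z == 0:
-- 			return ["1"]
-- 		elif z == 1:
-- 			return ["0"]
-- 		else:
-- 			return []
--
-- 	out: list[str] = []
-- 	for b in ndigit_binary_z(n - 1, z):
-- 		out.append(b + "1")
--
-- 	for b in ndigit_binary_z(n - 1, z - 1):
-- 		out.append(b + "0")
--
-- 	return out
--
-- def ndigit_binary_even0_odd1(n: int, z: int | None = None) -> list[str]: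
-- 	if n % 2 == 0:
-- 		return []
-- 	if z == None:
-- 		return ndigit_binary_even0_odd1(n, n - 1)
-- 	if z == 0:
-- 		return ndigit_binary_z(n, 0)
--
-- 	return ndigit_binary_z(n, z) + ndigit_binary_even0_odd1(n, z - 2)
-- ===== SOURCE B (Python) =====
-- def ndigit_binary_even0_odd1(n: int, z: int | None = None) -> list[str]:
-- 	if n % 2 == 0:
-- 		return []
-- 	if z is None:
-- 		z = n - 1
-- 	# row[k] = all k-zero binary strings of the current length, built bottom-up once
-- 	row = [["1"], ["0"]]
-- 	for _ in range(n - 1):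
-- 		new = []
-- 		carry: list[str] = []
-- 		for cell in row:
-- 			new.append([b + "1" for b in cell] + carry)
-- 			carry = [b + "0" for b in cell]
-- 		new.append(carry)
-- 		row = new
-- 	return [s for zz in range(z, -1, -2)
-- 	          for s in (row[zz] if 0 <= zz < len(row) else [])]
-- ===== Notes on version B (the rewrite author's own statement) =====
-- stated objective: alternative
-- what changed: B replaces A's top-down recursion (which recomputes ndigit_binary_z subproblems separately for every length and zero-count z) by one bottom-up dynamic-programming pass that builds, for each length, the whole row of subproblem lists at once and shares it across all zero-counts.
import Mathlib
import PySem

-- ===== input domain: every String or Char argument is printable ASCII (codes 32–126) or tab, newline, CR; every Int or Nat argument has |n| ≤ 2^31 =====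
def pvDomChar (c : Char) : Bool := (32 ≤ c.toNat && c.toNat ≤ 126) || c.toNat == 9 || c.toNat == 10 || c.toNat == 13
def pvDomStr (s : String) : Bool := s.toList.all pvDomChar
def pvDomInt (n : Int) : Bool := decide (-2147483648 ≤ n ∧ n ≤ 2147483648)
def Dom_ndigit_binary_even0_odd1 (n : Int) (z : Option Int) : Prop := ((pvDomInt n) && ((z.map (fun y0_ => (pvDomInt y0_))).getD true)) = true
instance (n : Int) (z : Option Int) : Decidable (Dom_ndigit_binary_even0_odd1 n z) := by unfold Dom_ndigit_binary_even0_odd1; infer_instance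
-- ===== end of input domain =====

-- B replaces A's top-down recomputation of ndigit_binary_z by one bottom-up DP pass
-- sharing each row of subproblem lists across all zero-counts (objective: alternative).

-- ===== PORT A =====
def ndigit_binary_z (n : Int) (zq : Int) : List String :=
  if n == 1 then
    if zq == 0 then ["1"]
    else if zq == 1 then ["0"]
    else []
  else if n < 1 then []  -- guard only: Python recurses forever here (outside Pre_)
  else
    let out := (ndigit_binary_z (n - 1) zq).foldl (fun out b => out ++ [b ++ "1"]) []
    (ndigit_binary_z (n - 1) (zq - 1)).foldl (fun out b => out ++ [b ++ "0"]) out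
termination_by n.toNat
decreasing_by all_goals (simp at *; omega)

def ndigit_binary_even0_odd1 (n : Int) (z : Option Int) : List String :=
  if PySem.Int.mod n 2 == 0 then []
  else
    match z with
    | none => ndigit_binary_even0_odd1 n (some (n - 1))
    | some zv =>
      if zv == 0 then ndigit_binary_z n 0
      else if zv < 0 then []  -- guard only: Python recurses forever here (outside Pre_)
      else ndigit_binary_z n zv ++ ndigit_binary_even0_odd1 n (some (zv - 2))
termination_by ((if z = none then 1 else 0), (z.getD (n - 1)).toNat)
decreasing_by all_goals (simp_all; omega)

-- ===== PORT B =====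
-- one pass over the previous row: cell k of the new row is row[k]+"1" ++ row[k-1]+"0"
def pvNrGo (carry : List String) : List (List String) → List (List String)
  | [] => [carry]
  | cell :: rest => (cell.map (· ++ "1") ++ carry) :: pvNrGo (cell.map (· ++ "0")) rest

def ndigit_binary_even0_odd1_alt (n : Int) (z : Option Int) : List String :=
  if PySem.Int.mod n 2 == 0 then []
  else
    let zv := z.getD (n - 1)
    let row := (PySem.List.pyRange 0 (n - 1) 1).foldl (fun r _ => pvNrGo [] r) [["1"], ["0"]]
    (PySem.List.pyRange zv (-1) (-2)).flatMap (fun zz =>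
      if 0 ≤ zz ∧ zz < (row.length : Int) then row.getD zz.toNat [] else [])

-- ===== PRECONDITION & SPEC =====
-- Pre_ excludes only inputs on which Python A never returns (infinite recursion /
-- RecursionError): odd n < 1, and odd n with an explicit z that is negative or odd.
def Pre_ndigit_binary_even0_odd1 (n : Int) (z : Option Int) : Prop :=
  PySem.Int.mod n 2 = 0 ∨ (1 ≤ n ∧ 0 ≤ z.getD 0 ∧ PySem.Int.mod (z.getD 0) 2 = 0)
instance (n : Int) (z : Option Int) : Decidable (Pre_ndigit_binary_even0_odd1 n z) := by unfold Pre_ndigit_binary_even0_odd1; infer_instance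

def pvWitness_ndigit_binary_even0_odd1 : Int × Option Int := (3, none)

def Spec_ndigit_binary_even0_odd1 (n : Int) (z : Option Int) (out : List String) : Prop := out = ndigit_binary_even0_odd1_alt n z
instance (n : Int) (z : Option Int) (out : List String) : Decidable (Spec_ndigit_binary_even0_odd1 n z out) := by unfold Spec_ndigit_binary_even0_odd1; infer_instance

-- ===== CLAIM (what is proved, stated in full; the proofs are below) =====
def Claim_equal_ndigit_binary_even0_odd1 : Prop := ∀ (n : Int) (z : Option Int), Dom_ndigit_binary_even0_odd1 n z → Pre_ndigit_binary_even0_odd1 n z → Spec_ndigit_binary_even0_odd1 n z (ndigit_binary_even0_odd1 n z)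

-- ===== LEMMAS AND PROOFS =====

-- ndigit_binary_z is empty outside 0 ≤ zq ≤ n
lemma pvZ_empty_aux : ∀ (m : Nat) (n zq : Int), n.toNat ≤ m → (zq < 0 ∨ n < zq) →
    ndigit_binary_z n zq = [] := by
  intro m
  induction m with
  | zero =>
    intro n zq hle h
    rw [ndigit_binary_z]
    have h1 : ¬ (n == 1) = true := by simp; omega
    have h2 : (n < 1) := by omega
    simp [h1, h2]
  | succ m ih =>
    intro n zq hle h
    rw [ndigit_binary_z]
    by_cases h1 : n = 1
    · subst h1
      have hz0 : ¬ (zq == 0) = true := by simp; omega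
      have hz1 : ¬ (zq == 1) = true := by simp; omega
      simp [hz0, hz1]
    · by_cases h2 : n < 1
      · simp [h1, h2]
      · have hrec : (n - 1).toNat ≤ m := by omega
        have e1 : ndigit_binary_z (n - 1) zq = [] := ih _ _ hrec (by omega)
        have e2 : ndigit_binary_z (n - 1) (zq - 1) = [] := ih _ _ hrec (by omega)
        simp [h1, h2, e1, e2]

lemma pvZ_empty (n zq : Int) (h : zq < 0 ∨ n < zq) : ndigit_binary_z n zq = [] :=
  pvZ_empty_aux n.toNat n zq le_rfl h

lemma pvZ_step (n zq : Int) (hn : 1 ≤ n) :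
    ndigit_binary_z (n + 1) zq
      = (ndigit_binary_z n zq).map (· ++ "1") ++ (ndigit_binary_z n (zq - 1)).map (· ++ "0") := by
  rw [ndigit_binary_z]
  have h1 : ¬ (n + 1 == 1) = true := by simp; omega
  have h2 : ¬ (n + 1 < 1) := by omega
  simp only [h1, if_neg h2, Bool.false_eq_true, if_false, add_sub_cancel_right]
  rw [PySem.List.foldl_append_singleton_eq_map, PySem.List.foldl_append_singleton_eq_map]
  simp

lemma pvNrGo_spec (nn : Int) (hnn : 1 ≤ nn) :
    ∀ (cnt : Nat) (s : Int), ndigit_binary_z nn (s + cnt) = [] →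
      pvNrGo ((ndigit_binary_z nn (s - 1)).map (· ++ "0"))
          ((List.range cnt).map (fun (j : Nat) => ndigit_binary_z nn (s + (j : Int))))
        = (List.range (cnt + 1)).map (fun (j : Nat) => ndigit_binary_z (nn + 1) (s + (j : Int))) := by
  intro cnt
  induction cnt with
  | zero =>
    intro s htop
    have htop' : ndigit_binary_z nn s = [] := by simpa using htop
    simp [pvNrGo, pvZ_step nn _ hnn, htop']
  | succ cnt ih =>
    intro s htop
    rw [List.range_succ_eq_map, List.range_succ_eq_map]
    simp only [List.map_cons, List.map_map, pvNrGo]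
    have hfun : ∀ (g : Int → List String),
        (fun j => g (s + ↑j)) ∘ Nat.succ = fun j : Nat => g ((s + 1) + ↑j) := by
      intro g; funext j; simp [Function.comp]; ring_nf
    rw [hfun, hfun]
    have hhead : (ndigit_binary_z nn (s + ↑(0:Nat))).map (· ++ "1")
        ++ (ndigit_binary_z nn (s - 1)).map (· ++ "0") = ndigit_binary_z (nn + 1) s := by
      simp [pvZ_step nn s hnn]
    have hcarry : (ndigit_binary_z nn s).map (· ++ "0")
        = (ndigit_binary_z nn ((s + 1) - 1)).map (· ++ "0") := by ring_nf
    have htop' : ndigit_binary_z nn ((s + 1) + ↑cnt) = [] := by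
      rw [show (s + 1) + (cnt : Int) = s + ↑(cnt + 1) by push_cast; ring]; exact htop
    simp only [Nat.cast_zero, add_zero] at hhead ⊢
    rw [hhead, hcarry, ih (s + 1) htop']

lemma pvRow_iter : ∀ (m : Nat),
    (fun r => pvNrGo [] r)^[m] [["1"], ["0"]]
      = (List.range (m + 2)).map (fun (j : Nat) => ndigit_binary_z ((m : Int) + 1) (j : Int)) := by
  intro m
  induction m with
  | zero =>
    have e0 : ndigit_binary_z 1 0 = ["1"] := by rw [ndigit_binary_z]; simp
    have e1 : ndigit_binary_z 1 1 = ["0"] := by rw [ndigit_binary_z]; simp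
    simp [List.range_succ, e0, e1]
  | succ m ih =>
    rw [Function.iterate_succ_apply', ih]
    have hc : ([] : List String) = (ndigit_binary_z ((m : Int) + 1) (0 - 1)).map (· ++ "0") := by
      rw [pvZ_empty _ _ (by omega)]; rfl
    have := pvNrGo_spec ((m : Int) + 1) (by omega) (m + 2) 0
      (by apply pvZ_empty; right; push_cast; omega)
    simp only [zero_add] at this
    rw [hc]
    have harg : (List.range (m + 2)).map (fun (j : Nat) => ndigit_binary_z ((m : Int) + 1) (j : Int))
        = (List.range (m + 2)).map (fun (j : Nat) => ndigit_binary_z ((m : Int) + 1) (0 + (j : Int))) := by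
      simp
    rw [show ((m : Int) + 1 + 1) = ((m + 1 : Nat) : Int) + 1 by push_cast; ring] at this
    simpa using this

lemma pvFoldl_const (l : List Int) (init : List (List String)) :
    l.foldl (fun r _ => pvNrGo [] r) init = (fun r => pvNrGo [] r)^[l.length] init := by
  induction l generalizing init with
  | nil => rfl
  | cons a l ih => simp [List.foldl_cons, ih, Function.iterate_succ_apply]

lemma pvRange_neg2_eval (zv : Int) :
    PySem.List.pyRange zv (-1) (-2)
      = (List.range (if (-1 : Int) < zv then ((zv + 2) / 2).toNat else 0)).map
          (fun (k : Nat) => zv + -2 * (k : Int)) := by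
  unfold PySem.List.pyRange
  rw [if_neg (by norm_num : ¬ ((-2 : Int) = 0)), if_neg (by norm_num : ¬ ((0 : Int) < -2))]
  have harith : zv - -1 + - -2 - 1 = zv + 2 := by ring
  rw [harith, show (- -2 : Int) = 2 from by norm_num]

lemma pvRange_neg2_nil (zv : Int) (h : zv < 0) : PySem.List.pyRange zv (-1) (-2) = [] := by
  rw [pvRange_neg2_eval, if_neg (by omega)]
  simp

lemma pvRange_neg2_cons (zv : Int) (h : 0 ≤ zv) :
    PySem.List.pyRange zv (-1) (-2) = zv :: PySem.List.pyRange (zv - 2) (-1) (-2) := by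
  rw [pvRange_neg2_eval, pvRange_neg2_eval]
  have hcount : (if (-1 : Int) < zv then ((zv + 2) / 2).toNat else 0)
      = (if (-1 : Int) < zv - 2 then ((zv - 2 + 2) / 2).toNat else 0) + 1 := by
    by_cases h2 : (-1 : Int) < zv - 2
    · rw [if_pos (by omega), if_pos h2]; omega
    · rw [if_pos (by omega), if_neg h2]; omega
  rw [hcount, List.range_succ_eq_map]
  simp only [List.map_cons, List.map_map, Nat.cast_zero, mul_zero, add_zero]
  congr 1
  refine List.map_congr_left (fun k _ => ?_)
  simp only [Function.comp, Nat.succ_eq_add_one]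
  push_cast
  ring

lemma pvGo_eq (n : Int) (hn : 1 ≤ n) (R : List (List String)) (hodd : ¬ (PySem.Int.mod n 2 == 0) = true)
    (hR : R = (List.range (n.toNat + 1)).map (fun (j : Nat) => ndigit_binary_z n (j : Int)))
    (zv : Int) :
    ndigit_binary_even0_odd1 n (some zv)
      = (PySem.List.pyRange zv (-1) (-2)).flatMap (fun zz =>
          if 0 ≤ zz ∧ zz < (R.length : Int) then R.getD zz.toNat [] else []) := by
  have hndvd : ¬ (2 : Int) ∣ n := by
    rw [← PySem.Int.mod_eq_zero_iff_dvd]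
    simpa using hodd
  have hlen : (R.length : Int) = n + 1 := by
    subst hR
    simp only [List.length_map, List.length_range]
    omega
  have hget : ∀ w : Int, 0 ≤ w → w < n + 1 → R.getD w.toNat [] = ndigit_binary_z n w := by
    intro w h0 h1
    subst hR
    have hk : w.toNat < n.toNat + 1 := by omega
    rw [List.getD_eq_getElem?_getD, List.getElem?_map, List.getElem?_range hk]
    simp only [Option.map_some, Option.getD_some]
    congr 1
    omega
  by_cases hneg : zv < 0
  · rw [pvRange_neg2_nil zv hneg, ndigit_binary_even0_odd1]
    have hz0 : ¬ (zv == 0) = true := by simp; omega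
    simp [hz0, hneg]
  · have hneg' : 0 ≤ zv := by omega
    rw [pvRange_neg2_cons zv hneg', List.flatMap_cons]
    have hcell : (if 0 ≤ zv ∧ zv < (R.length : Int) then R.getD zv.toNat [] else [])
        = ndigit_binary_z n zv := by
      rw [hlen]
      by_cases hin : zv < n + 1
      · rw [if_pos ⟨hneg', hin⟩]; exact hget zv hneg' hin
      · rw [if_neg (by omega)]
        exact (pvZ_empty n zv (by omega)).symm
    by_cases h0 : zv = 0
    · subst h0
      rw [pvRange_neg2_nil (0 - 2) (by omega), List.flatMap_nil, List.append_nil, hcell,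
          ndigit_binary_even0_odd1]
      simp [hndvd]
    · rw [ndigit_binary_even0_odd1]
      have hz0 : ¬ (zv == 0) = true := by simp; omega
      simp only [hodd, Bool.false_eq_true, if_false, hz0, if_neg (by omega : ¬ zv < 0)]
      rw [hcell, pvGo_eq n hn R hodd hR (zv - 2)]
termination_by zv.toNat
decreasing_by omega

-- ===== VERDICT (by name: the statement is the Claim_ definition above) =====
theorem ndigit_binary_even0_odd1_spec : Claim_equal_ndigit_binary_even0_odd1 := by
  intro n z _hdom hpre
  unfold Spec_ndigit_binary_even0_odd1 ndigit_binary_even0_odd1_alt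
  by_cases heven : (PySem.Int.mod n 2 == 0) = true
  · have hdvd : (2 : Int) ∣ n := by
      rw [← PySem.Int.mod_eq_zero_iff_dvd]
      simpa using heven
    rw [ndigit_binary_even0_odd1.eq_def]
    cases z <;> simp [hdvd]
  · have hn : 1 ≤ n := by
      rcases hpre with h | h
      · exact absurd (by simpa using h) heven
      · exact h.1
    have hrow : (PySem.List.pyRange 0 (n - 1) 1).foldl (fun r _ => pvNrGo [] r) [["1"], ["0"]]
        = (List.range (n.toNat + 1)).map (fun (j : Nat) => ndigit_binary_z n (j : Int)) := by
      rw [pvFoldl_const, PySem.List.length_pyRange_one, pvRow_iter]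
      have h1 : ((n - 1 - 0).toNat : Int) + 1 = n := by omega
      have h2 : (n - 1 - 0).toNat + 2 = n.toNat + 1 := by omega
      rw [h1, h2]
    cases z with
    | none =>
      rw [ndigit_binary_even0_odd1.eq_def]
      simp only [heven, Bool.false_eq_true, if_false]
      rw [pvGo_eq n hn _ heven hrow (n - 1)]
      rfl
    | some zv =>
      rw [pvGo_eq n hn _ heven hrow zv, if_neg heven]
      rfl
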